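-- pv_equiv track=rewrite | github.com/jochie/adventofcode | 2024/24/program.py | bitmap_wires
-- ===== SOURCE A (Python) =====
-- def bitmap_wires(opts, wire_prefix, wires):
--     bitmap = 0
--     for wire in wires.keys():
--         if wire[0] != wire_prefix:
--             continue
--         bit = int(wire[1:])
--         if wires[wire]:
--             bitmap |= 1 << bit
--     return bitmap
-- ===== SOURCE B (Python) =====
-- def bitmap_wires(opts, wire_prefix, wires):
--     bits = {int(w[1:]) for w in wires if w[0] == wire_prefix and wires[w]}
--     if not bits:
--         return 0
--     binary = ''.join('1' if p in bits else '0' for p in range(max(bits), -1, -1))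
--     return int(binary, 2)
-- ===== Notes on version B (the rewrite author's own statement) =====
-- stated objective: alternative
-- what changed: A OR-accumulates 1<<bit per wire in a single pass; B instead stages: it collects the matching truthy bit indices into a set, then constructs the binary-numeral string position by position from the maximum index down to 0 ('1' if present, '0' otherwise) and parses it with int(s, 2), returning 0 when no wire matches.
import Mathlib
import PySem

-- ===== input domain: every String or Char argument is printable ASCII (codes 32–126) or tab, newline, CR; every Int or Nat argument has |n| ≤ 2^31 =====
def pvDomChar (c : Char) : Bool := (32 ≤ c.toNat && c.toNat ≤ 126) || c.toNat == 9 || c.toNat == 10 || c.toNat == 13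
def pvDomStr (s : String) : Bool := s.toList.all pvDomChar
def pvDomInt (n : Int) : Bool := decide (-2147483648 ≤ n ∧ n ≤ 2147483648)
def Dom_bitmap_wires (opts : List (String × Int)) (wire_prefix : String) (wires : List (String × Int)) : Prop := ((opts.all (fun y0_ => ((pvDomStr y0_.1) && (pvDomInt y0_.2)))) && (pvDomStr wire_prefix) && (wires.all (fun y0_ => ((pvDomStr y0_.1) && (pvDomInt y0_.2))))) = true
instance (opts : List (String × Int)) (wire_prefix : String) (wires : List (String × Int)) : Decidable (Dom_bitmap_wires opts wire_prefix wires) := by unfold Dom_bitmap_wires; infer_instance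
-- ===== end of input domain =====

-- B replaces A's incremental bit-OR loop by a staged construction: collect the matching
-- truthy bit indices into a set, then build the binary-numeral string from the maximum
-- index down to 0 and parse it in base 2 (alternative decomposition, same result on Pre_).

-- ===== PORT A =====
-- A, literally: bitmap = 0; for wire in wires.keys(): skip on prefix mismatch,
-- bit = int(wire[1:]), if wires[wire]: bitmap |= 1 << bit.  The dict argument is
-- PySem.Dict.ofList wires.  Where Python raises (empty key: IndexError; int() ValueError;
-- negative shift) Pre_ excludes the input and the port leaves the accumulator unchanged /
-- clamps the shift with toNat.
-- the loop body of A (one iteration of 'for wire in wires.keys()')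
def pvStepA (pfx : List Char) (d : PySem.Dict String Int) (bitmap : Int) (wire : String) : Int :=
  match PySem.Str.pyGet? wire 0 with
  | none => bitmap                                  -- wire[0] IndexError: outside Pre_
  | some c =>
    if [c] ≠ pfx then bitmap                        -- wire[0] != wire_prefix: continue
    else
      match PySem.Int.ofStr? (PySem.Str.slice wire (some 1) none) with
      | none => bitmap                              -- int(wire[1:]) ValueError: outside Pre_
      | some bit =>
        if d.getD wire 0 ≠ 0 then
          PySem.Int.bor bitmap ((1 : Int) <<< Int.toNat bit)  -- bitmap |= 1 << bit (bit < 0 raises in Python: outside Pre_)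
        else bitmap

def bitmap_wires (opts : List (String × Int)) (wire_prefix : String) (wires : List (String × Int)) : Int :=
  let d := PySem.Dict.ofList wires
  d.keys.foldl (pvStepA wire_prefix.toList d) 0

-- ===== PORT B =====
-- B, literally: bits = {int(w[1:]) for w in wires if w[0] == wire_prefix and wires[w]};
-- if not bits: return 0; binary = ''.join('1' if p in bits else '0' for p in
-- range(max(bits), -1, -1)); return int(binary, 2).  int(binary, 2) is ported as the
-- base-2 left fold acc*2 + digit, exact here because binary contains only '0'/'1'.
-- one step of B's set comprehension over the dict keys
def pvStepB (pfx : List Char) (d : PySem.Dict String Int) (s : PySem.Set Int) (w : String) : PySem.Set Int :=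
  match PySem.Str.pyGet? w 0 with
  | none => s                                       -- w[0] IndexError: outside Pre_
  | some c =>
    if [c] = pfx ∧ d.getD w 0 ≠ 0 then
      match PySem.Int.ofStr? (PySem.Str.slice w (some 1) none) with
      | none => s                                   -- int(w[1:]) ValueError: outside Pre_
      | some b => PySem.Set.add s b
    else s

def bitmap_wires_alt (opts : List (String × Int)) (wire_prefix : String) (wires : List (String × Int)) : Int :=
  let d := PySem.Dict.ofList wires
  let bits : PySem.Set Int := d.keys.foldl (pvStepB wire_prefix.toList d) PySem.Set.empty
  if bits = PySem.Set.empty then 0                  -- if not bits: return 0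
  else
    match PySem.List.max? bits (fun x => x) with    -- max(bits)
    | none => 0                                     -- unreachable: bits nonempty
    | some m =>
      let binary := (PySem.List.pyRange m (-1) (-1)).map
        (fun p => if PySem.Set.contains bits p then '1' else '0')
      binary.foldl (fun acc c => acc * 2 + (if c = '1' then 1 else 0)) (0 : Int)

-- ===== PRECONDITION & SPEC =====
-- pvPreKey: one dict key is safe for A — nonempty, and if it matches the prefix its tail
-- parses as an int which is ≥ 0 whenever the wire's value is truthy (so 1 << bit is legal).
def pvPreKey (pfx : List Char) (vw : Int) : List Char → Bool
  | [] => false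
  | c :: rest =>
    if [c] = pfx then
      match PySem.Int.ofChars? rest with
      | none => false
      | some b => decide (0 ≤ b) || decide (vw = 0)
    else true

-- Pre_ holds exactly when Python A returns normally: every dict key is nonempty, and every
-- key matching the prefix has an int-parsable tail whose value is ≥ 0 if the wire is truthy.
def Pre_bitmap_wires (opts : List (String × Int)) (wire_prefix : String) (wires : List (String × Int)) : Prop :=
  ((PySem.Dict.ofList wires).keys.all (fun w =>
      pvPreKey wire_prefix.toList ((PySem.Dict.ofList wires).getD w 0) w.toList)) = true
instance (opts : List (String × Int)) (wire_prefix : String) (wires : List (String × Int)) : Decidable (Pre_bitmap_wires opts wire_prefix wires) := by unfold Pre_bitmap_wires; infer_instance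

def pvWitness_bitmap_wires : (List (String × Int)) × String × (List (String × Int)) :=
  ([], "z", [("z1", 1), ("z0", 1), ("a3", 5)])

def Spec_bitmap_wires (opts : List (String × Int)) (wire_prefix : String) (wires : List (String × Int)) (out : Int) : Prop := out = bitmap_wires_alt opts wire_prefix wires
instance (opts : List (String × Int)) (wire_prefix : String) (wires : List (String × Int)) (out : Int) : Decidable (Spec_bitmap_wires opts wire_prefix wires out) := by unfold Spec_bitmap_wires; infer_instance

-- ===== CLAIM (what is proved, stated in full; the proofs are below) =====
def Claim_equal_bitmap_wires : Prop := ∀ (opts : List (String × Int)) (wire_prefix : String) (wires : List (String × Int)), Dom_bitmap_wires opts wire_prefix wires → Pre_bitmap_wires opts wire_prefix wires → Spec_bitmap_wires opts wire_prefix wires (bitmap_wires opts wire_prefix wires)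

-- ===== LEMMAS AND PROOFS =====

-- classification of one dict key: some bit iff the wire matches the prefix, parses and is truthy
def pvClassify (pfx : List Char) (vw : Int) : List Char → Option Int
  | [] => none
  | c :: rest =>
    if [c] = pfx then
      match PySem.Int.ofChars? rest with
      | none => none
      | some b => if vw ≠ 0 then some b else none
    else none

theorem pv_pyGet0 (w : String) (c : Char) (rest : List Char) (h : w.toList = c :: rest) :
    PySem.Str.pyGet? w 0 = some c := by
  simp [PySem.Str.pyGet?, h]

theorem pv_pyGet0_nil (w : String) (h : w.toList = []) : PySem.Str.pyGet? w 0 = none := by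
  simp [PySem.Str.pyGet?, h, PySem.List.pyGet?]

theorem pv_parse_tail (w : String) :
    PySem.Int.ofStr? (PySem.Str.slice w (some 1) none) = PySem.Int.ofChars? w.toList.tail := by
  simp [PySem.Int.ofStr?, PySem.Str.slice, PySem.List.slice_from_one]

theorem pv_stepA_eq (pfx : List Char) (d : PySem.Dict String Int) (acc : Int) (w : String) :
    pvStepA pfx d acc w
    = (match pvClassify pfx (d.getD w 0) w.toList with
       | none => acc
       | some b => PySem.Int.bor acc ((1 : Int) <<< Int.toNat b)) := by
  unfold pvStepA
  rcases h : w.toList with _ | ⟨c, rest⟩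
  · rw [pv_pyGet0_nil w h]; rfl
  · rw [pv_pyGet0 w c rest h, pv_parse_tail w, h]
    simp only [pvClassify, List.tail_cons]
    by_cases hp : [c] = pfx
    · rw [if_neg (show ¬ [c] ≠ pfx from fun hh => hh hp), if_pos hp]
      cases hq : PySem.Int.ofChars? rest with
      | none => rfl
      | some b =>
        dsimp only
        by_cases ht : d.getD w 0 = 0
        · rw [if_neg (by simp [ht]), if_neg (by simp [ht])]
        · rw [if_pos ht, if_pos ht]
    · rw [if_pos hp, if_neg hp]

theorem pv_stepB_eq (pfx : List Char) (d : PySem.Dict String Int) (s : PySem.Set Int) (w : String) :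
    pvStepB pfx d s w
    = (match pvClassify pfx (d.getD w 0) w.toList with
       | none => s
       | some b => PySem.Set.add s b) := by
  unfold pvStepB
  rcases h : w.toList with _ | ⟨c, rest⟩
  · rw [pv_pyGet0_nil w h]; rfl
  · rw [pv_pyGet0 w c rest h, pv_parse_tail w, h]
    simp only [pvClassify, List.tail_cons]
    by_cases hp : [c] = pfx
    · by_cases ht : d.getD w 0 = 0
      · rw [if_neg (by simp [ht]), if_pos hp]
        cases hq : PySem.Int.ofChars? rest with
        | none => rfl
        | some b => dsimp only; rw [if_neg (by simp [ht])]
      · rw [if_pos ⟨hp, ht⟩, if_pos hp]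
        cases hq : PySem.Int.ofChars? rest with
        | none => rfl
        | some b => dsimp only; rw [if_pos ht]
    · rw [if_neg (by simp [hp]), if_neg hp]

-- a &&& b = 0 → a ||| b = a + b (disjoint bits add)
theorem pv_lor_eq_add : ∀ (a b : Nat), a &&& b = 0 → a ||| b = a + b := by
  intro a
  induction a using Nat.binaryRec with
  | zero => simp
  | bit x m IH =>
    intro b h
    rw [← Nat.bit_testBit_zero_shiftRight_one b] at h ⊢
    rw [Nat.lor_bit]
    rw [Nat.land_bit] at h
    rcases Nat.bit_eq_zero_iff.mp h with ⟨h1, h2⟩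
    rw [Nat.bit_val, Nat.bit_val, Nat.bit_val, IH _ h1]
    cases x <;> cases hb : b.testBit 0 <;> simp_all <;> omega

-- A's accumulation over Nat: testBit of the OR-fold = membership in the processed bit list
theorem pv_orFold_testBit (M : List Nat) : ∀ (a : Nat) (i : Nat),
    (M.foldl (fun n x => n ||| (1 <<< x)) a).testBit i = (a.testBit i || decide (i ∈ M)) := by
  induction M with
  | nil => simp
  | cons x M' IH =>
    intro a i
    rw [List.foldl_cons, IH (a ||| 1 <<< x) i, Nat.testBit_lor, Nat.one_shiftLeft,
      Nat.testBit_two_pow]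
    by_cases hx : x = i
    · simp [hx, List.mem_cons]
    · simp [hx, List.mem_cons, Ne.symm hx]

-- sum of distinct powers of two: testBit = membership
theorem pv_sumPow_testBit (N : List Nat) : N.Nodup → ∀ (i : Nat),
    ((N.map (fun x => 2 ^ x)).sum).testBit i = decide (i ∈ N) := by
  induction N with
  | nil => intro _ i; simp
  | cons x N' IH =>
    intro hN i
    rcases List.nodup_cons.mp hN with ⟨hx, hN'⟩
    have hS : ((N'.map (fun x => 2 ^ x)).sum).testBit x = false := by
      rw [IH hN' x]; simp [hx]
    have hand : 2 ^ x &&& (N'.map (fun x => 2 ^ x)).sum = 0 := by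
      rw [Nat.two_pow_and, hS]; simp
    have hsum : (((x :: N').map (fun x => 2 ^ x)).sum) = 2 ^ x ||| (N'.map (fun x => 2 ^ x)).sum := by
      simp only [List.map_cons, List.sum_cons]
      rw [pv_lor_eq_add _ _ hand]
    rw [hsum, Nat.testBit_lor, Nat.testBit_two_pow, IH hN' i]
    by_cases hx' : x = i
    · simp [hx', List.mem_cons]
    · simp [hx', List.mem_cons, Ne.symm hx']

-- the Int-level OR fold over the classified keys equals the cast of the Nat-level OR fold
theorem pv_foldA_cast (cl : String → Option Int) (ks : List String) : ∀ (a : Nat),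
    (ks.foldl (fun acc w => match cl w with
       | none => acc
       | some b => PySem.Int.bor acc ((1 : Int) <<< Int.toNat b)) ((a : Nat) : Int))
    = (((ks.filterMap (fun w => (cl w).map Int.toNat)).foldl (fun n x => n ||| (1 <<< x)) a : Nat) : Int) := by
  induction ks with
  | nil => intro a; simp
  | cons w ks' IH =>
    intro a
    simp only [List.foldl_cons, List.filterMap_cons]
    cases hw : cl w with
    | none => simpa using IH a
    | some b =>
      simp only [Option.map_some]
      have hcast : PySem.Int.bor ((a : Nat) : Int) ((1 : Int) <<< Int.toNat b)
          = (((a ||| (1 <<< Int.toNat b : Nat)) : Nat) : Int) := by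
        rw [show ((1 : Int) <<< Int.toNat b) = (((1 <<< Int.toNat b : Nat)) : Int) by
              rw [Int.natCast_shiftLeft, Nat.cast_one],
           PySem.Int.bor_natCast]
      rw [hcast, IH (a ||| (1 <<< Int.toNat b))]
      simp [List.foldl_cons]

theorem pv_foldA_cast0 (cl : String → Option Int) (ks : List String) :
    (ks.foldl (fun acc w => match cl w with
       | none => acc
       | some b => PySem.Int.bor acc ((1 : Int) <<< Int.toNat b)) (0 : Int))
    = (((ks.filterMap (fun w => (cl w).map Int.toNat)).foldl (fun n x => n ||| (1 <<< x)) 0 : Nat) : Int) := by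
  simpa using pv_foldA_cast cl ks 0

-- B's set fold is the fold of Set.add over the classified bits
theorem pv_foldB_set (cl : String → Option Int) (ks : List String) : ∀ (s : PySem.Set Int),
    (ks.foldl (fun s w => match cl w with
       | none => s
       | some b => PySem.Set.add s b) s)
    = ((ks.filterMap cl).foldl PySem.Set.add s) := by
  induction ks with
  | nil => intro s; rfl
  | cons w ks' IH =>
    intro s
    simp only [List.foldl_cons, List.filterMap_cons]
    cases hw : cl w with
    | none => exact IH s
    | some b => simp only [List.foldl_cons]; exact IH _

-- cast of a sum of powers of two
theorem pv_cast_sum (N : List Nat) :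
    ((N.map (fun n => (((2 ^ n : Nat)) : Int))).sum) = (((N.map (fun n => 2 ^ n)).sum : Nat) : Int) := by
  induction N with
  | nil => simp
  | cons x N' IH => simp only [List.map_cons, List.sum_cons, Nat.cast_add, IH]

-- the heart of the A side: OR-fold over a bit list (with duplicates) = sum of 2^b over its
-- dedup, provided every listed bit is ≥ 0
theorem pv_core (L : List Int) (hL : ∀ b ∈ L, 0 ≤ b) :
    (((L.map Int.toNat).foldl (fun n x => n ||| (1 <<< x)) 0 : Nat) : Int)
    = ((PySem.List.dedup L).map (fun b => (1 : Int) <<< Int.toNat b)).sum := by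
  have hmap : (PySem.List.dedup L).map (fun b => (1 : Int) <<< Int.toNat b)
      = ((PySem.List.dedup L).map Int.toNat).map (fun n => (((2 ^ n : Nat)) : Int)) := by
    rw [List.map_map]
    apply List.map_congr_left
    intro b _
    show (1 : Int) <<< Int.toNat b = (((2 ^ Int.toNat b : Nat)) : Int)
    rw [← Nat.one_shiftLeft, Int.natCast_shiftLeft, Nat.cast_one]
  rw [hmap, pv_cast_sum]
  congr 1
  have hNnodup : ((PySem.List.dedup L).map Int.toNat).Nodup := by
    apply (List.nodup_map_iff_inj_on (PySem.List.nodup_dedup L)).mpr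
    intro x hx y hy hxy
    have hx' : 0 ≤ x := hL x ((PySem.List.mem_dedup _ _).mp hx)
    have hy' : 0 ≤ y := hL y ((PySem.List.mem_dedup _ _).mp hy)
    omega
  apply Nat.eq_of_testBit_eq
  intro i
  rw [pv_orFold_testBit, pv_sumPow_testBit _ hNnodup i]
  simp only [Nat.zero_testBit, Bool.false_or]
  refine decide_eq_decide.mpr ?_
  simp only [List.mem_map]
  constructor
  · rintro ⟨b, hb, rfl⟩; exact ⟨b, (PySem.List.mem_dedup _ _).mpr hb, rfl⟩
  · rintro ⟨b, hb, rfl⟩; exact ⟨b, (PySem.List.mem_dedup _ _).mp hb, rfl⟩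

-- Pre_ forces every classified bit to be nonnegative
theorem pv_bits_nonneg (pfx : List Char) (d : PySem.Dict String Int) (ks : List String)
    (hpre : ks.all (fun w => pvPreKey pfx (d.getD w 0) w.toList) = true) :
    ∀ b ∈ ks.filterMap (fun w => pvClassify pfx (d.getD w 0) w.toList), 0 ≤ b := by
  intro b hb
  rcases List.mem_filterMap.mp hb with ⟨w, hw, hcl⟩
  have hkey : pvPreKey pfx (d.getD w 0) w.toList = true := by
    simpa using List.all_eq_true.mp hpre w hw
  rcases h : w.toList with _ | ⟨c, rest⟩
  · rw [h] at hcl; exact absurd hcl (by simp [pvClassify])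
  · rw [h] at hcl hkey
    simp only [pvClassify] at hcl
    simp only [pvPreKey] at hkey
    by_cases hp : [c] = pfx
    · rw [if_pos hp] at hcl hkey
      cases hparse : PySem.Int.ofChars? rest with
      | none => rw [hparse] at hcl; exact absurd hcl (by simp)
      | some b' =>
        rw [hparse] at hcl hkey
        dsimp only at hcl hkey
        by_cases ht : d.getD w 0 = 0
        · rw [if_neg (by simp [ht])] at hcl; exact absurd hcl (by simp)
        · rw [if_pos (by simp [ht])] at hcl
          have hb' : b' = b := by simpa using hcl
          rcases Bool.or_eq_true_iff.mp hkey with h1 | h1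
          · subst hb'; exact of_decide_eq_true h1
          · exact absurd (of_decide_eq_true h1) ht
    · rw [if_neg hp] at hcl; exact absurd hcl (by simp)

-- B side: the base-2 parse over positions n..0 of a 0/1 indicator, collapsed fold form
theorem pv_parse_fold_aux (ind : Int → Bool) : ∀ (n : Nat) (a : Int),
    ((PySem.List.pyRange (n : Int) (-1) (-1)).foldl
      (fun acc p => acc * 2 + (if ind p then 1 else 0)) a)
    = a * 2 ^ (n + 1) + ∑ k ∈ Finset.range (n + 1), (if ind (k : Int) then (2 : Int) ^ k else 0) := by
  intro n
  induction n with
  | zero =>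
    intro a
    simp only [Nat.cast_zero]
    rw [PySem.List.pyRange_neg_one_cons (by norm_num : (-1 : Int) < 0),
      show ((0 : Int) - 1) = -1 by ring,
      PySem.List.pyRange_neg_one_eq_nil (le_refl (-1 : Int))]
    rw [List.foldl_cons, List.foldl_nil, Finset.sum_range_one]
    norm_num
  | succ n IH =>
    intro a
    rw [PySem.List.pyRange_neg_one_cons (by push_cast; omega : (-1 : Int) < ((n + 1 : Nat) : Int)),
      show (((n + 1 : Nat) : Int) - 1) = (n : Int) by push_cast; ring]
    rw [List.foldl_cons, IH (a * 2 + (if ind ((n + 1 : Nat) : Int) then 1 else 0))]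
    conv_rhs => rw [Finset.sum_range_succ]
    by_cases h : ind ((n + 1 : Nat) : Int)
    · rw [if_pos h, if_pos h]; ring
    · rw [if_neg h, if_neg h]; ring

-- B side: the base-2 parse of the binary string built over positions n..0
theorem pv_parse_fold (ind : Int → Bool) (n : Nat) (a : Int) :
    (((PySem.List.pyRange (n : Int) (-1) (-1)).map (fun p => if ind p then '1' else '0')).foldl
      (fun acc c => acc * 2 + (if c = '1' then 1 else 0)) a)
    = a * 2 ^ (n + 1) + ∑ k ∈ Finset.range (n + 1), (if ind (k : Int) then (2 : Int) ^ k else 0) := by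
  rw [List.foldl_map,
    show (fun (acc : Int) (p : Int) => acc * 2 + (if (if ind p then '1' else '0') = '1' then (1 : Int) else 0))
       = fun (acc : Int) (p : Int) => acc * 2 + (if ind p then 1 else 0) by
      funext acc p; by_cases h : ind p <;> simp [h]]
  exact pv_parse_fold_aux ind n a

-- B side: the indicated power sum over 0..n with membership in a nodup, nonneg,
-- n-bounded set S of Ints is the sum of 1 <<< b.toNat over S.
theorem pv_sum_mem (S : List Int) (hnd : S.Nodup) (h0 : ∀ b ∈ S, 0 ≤ b) (n : Nat)
    (hle : ∀ b ∈ S, b ≤ (n : Int)) :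
    (∑ k ∈ Finset.range (n + 1), (if PySem.Set.contains S (k : Int) then (2 : Int) ^ k else 0))
    = (S.map (fun b => (1 : Int) <<< Int.toNat b)).sum := by
  have hN : (S.map Int.toNat).Nodup := by
    apply (List.nodup_map_iff_inj_on hnd).mpr
    intro x hx y hy hxy
    have := h0 x hx; have := h0 y hy; omega
  have hmem : ∀ (k : Nat), (PySem.Set.contains S (k : Int) = true) ↔ k ∈ (S.map Int.toNat).toFinset := by
    intro k
    simp only [PySem.Set.contains, List.contains_iff_mem, List.mem_toFinset, List.mem_map]
    constructor
    · intro hk; exact ⟨(k : Int), hk, by omega⟩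
    · rintro ⟨b, hb, rfl⟩
      have := h0 b hb
      rwa [Int.toNat_of_nonneg this]
  have h1 : (∑ k ∈ Finset.range (n + 1), (if PySem.Set.contains S (k : Int) then (2 : Int) ^ k else 0))
      = ∑ k ∈ Finset.range (n + 1), (if k ∈ (S.map Int.toNat).toFinset then (2 : Int) ^ k else 0) := by
    apply Finset.sum_congr rfl
    intro k _
    by_cases hk : PySem.Set.contains S (k : Int)
    · rw [if_pos hk, if_pos ((hmem k).mp hk)]
    · rw [if_neg hk, if_neg (fun hc => hk ((hmem k).mpr hc))]
  rw [h1, Finset.sum_ite_mem]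
  have hsub : (S.map Int.toNat).toFinset ⊆ Finset.range (n + 1) := by
    intro k hk
    rcases List.mem_map.mp (List.mem_toFinset.mp hk) with ⟨b, hb, rfl⟩
    have := h0 b hb; have := hle b hb
    simp only [Finset.mem_range]; omega
  rw [Finset.inter_eq_right.mpr hsub, List.sum_toFinset _ hN, List.map_map]
  apply congrArg
  apply List.map_congr_left
  intro b _
  show (2 : Int) ^ b.toNat = (1 : Int) <<< b.toNat
  rw [show ((1 : Int) <<< Int.toNat b) = (((1 <<< Int.toNat b : Nat)) : Int) by
        rw [Int.natCast_shiftLeft, Nat.cast_one],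
    Nat.one_shiftLeft]
  push_cast
  ring

-- ===== VERDICT (by name: the statement is the Claim_ definition above) =====
theorem bitmap_wires_spec : Claim_equal_bitmap_wires := by
  unfold Claim_equal_bitmap_wires
  intro opts wire_prefix wires _ hpre
  unfold Spec_bitmap_wires
  unfold Pre_bitmap_wires at hpre
  have hAdef : bitmap_wires opts wire_prefix wires
      = (PySem.Dict.ofList wires).keys.foldl
          (pvStepA wire_prefix.toList (PySem.Dict.ofList wires)) 0 := rfl
  have hBdef : bitmap_wires_alt opts wire_prefix wires
      = (if ((PySem.Dict.ofList wires).keys.foldl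
              (pvStepB wire_prefix.toList (PySem.Dict.ofList wires)) PySem.Set.empty)
            = PySem.Set.empty then (0 : Int)
         else
           match PySem.List.max? ((PySem.Dict.ofList wires).keys.foldl
              (pvStepB wire_prefix.toList (PySem.Dict.ofList wires)) PySem.Set.empty)
              (fun x => x) with
           | none => (0 : Int)
           | some m =>
             ((PySem.List.pyRange m (-1) (-1)).map
               (fun p => if PySem.Set.contains ((PySem.Dict.ofList wires).keys.foldl
                  (pvStepB wire_prefix.toList (PySem.Dict.ofList wires)) PySem.Set.empty) p
                 then '1' else '0')).foldl
               (fun (acc : Int) c => acc * 2 + (if c = '1' then 1 else 0)) (0 : Int)) := rfl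
  rw [hAdef, hBdef]
  set d := PySem.Dict.ofList wires with hd
  set pfx := wire_prefix.toList with hpfx
  have hA : pvStepA pfx d
      = (fun (acc : Int) (w : String) => match pvClassify pfx (d.getD w 0) w.toList with
          | none => acc
          | some b => PySem.Int.bor acc ((1 : Int) <<< Int.toNat b)) := by
    funext acc w; exact pv_stepA_eq pfx d acc w
  have hB : pvStepB pfx d
      = (fun (s : PySem.Set Int) (w : String) => match pvClassify pfx (d.getD w 0) w.toList with
          | none => s
          | some b => PySem.Set.add s b) := by
    funext s w; exact pv_stepB_eq pfx d s w
  rw [hA, hB]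
  set L := d.keys.filterMap (fun w => pvClassify pfx (d.getD w 0) w.toList) with hL
  have hLnn : ∀ b ∈ L, 0 ≤ b := pv_bits_nonneg pfx d d.keys hpre
  have hAval : (d.keys.foldl (fun (acc : Int) (w : String) =>
      match pvClassify pfx (d.getD w 0) w.toList with
      | none => acc
      | some b => PySem.Int.bor acc ((1 : Int) <<< Int.toNat b)) 0)
      = ((PySem.List.dedup L).map (fun b => (1 : Int) <<< Int.toNat b)).sum := by
    rw [pv_foldA_cast0 (fun w => pvClassify pfx (d.getD w 0) w.toList) d.keys]
    rw [show d.keys.filterMap (fun w => (pvClassify pfx (d.getD w 0) w.toList).map Int.toNat)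
        = L.map Int.toNat from List.map_filterMap.symm]
    exact pv_core L hLnn
  have hset : (d.keys.foldl (fun (s : PySem.Set Int) (w : String) =>
      match pvClassify pfx (d.getD w 0) w.toList with
      | none => s
      | some b => PySem.Set.add s b) PySem.Set.empty) = PySem.List.dedup L := by
    rw [pv_foldB_set (fun w => pvClassify pfx (d.getD w 0) w.toList) d.keys PySem.Set.empty]
    rw [show (PySem.Set.empty : PySem.Set Int) = [] from rfl, ← PySem.Set.ofList_eq_foldl,
      PySem.List.dedup_eq_ofList]
  rw [hAval, hset]
  set S := PySem.List.dedup L with hS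
  have hSnn : ∀ b ∈ S, 0 ≤ b := fun b hb => hLnn b ((PySem.List.mem_dedup _ _).mp hb)
  by_cases hSe : S = PySem.Set.empty
  · rw [if_pos hSe, hSe]
    rfl
  · rw [if_neg hSe]
    cases hm : PySem.List.max? S (fun x => x) with
    | none =>
      exact absurd ((PySem.List.max?_eq_none_iff S _).mp hm) hSe
    | some m =>
      dsimp only
      have hmS : m ∈ S := PySem.List.max?_mem hm
      have hm0 : 0 ≤ m := hSnn m hmS
      have hmax : ∀ b ∈ S, b ≤ m := fun b hb => PySem.List.max?_isMax hm b hb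
      have hmn : m = ((m.toNat : Nat) : Int) := (Int.toNat_of_nonneg hm0).symm
      rw [hmn, pv_parse_fold (fun p => PySem.Set.contains S p) m.toNat 0,
        pv_sum_mem S (PySem.List.nodup_dedup L) hSnn m.toNat
          (fun b hb => by rw [← hmn]; exact hmax b hb)]
      ring
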